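-- pv_equiv track=rewrite | github.com/Advanced-Observability/dxagent | agent/web/dxweb.py | path_to_nodes
-- ===== SOURCE A (Python) =====
-- def path_to_nodes(path):
--
--    nodes = []
--    node = ""
--
--    parsing_name=False
--    for c in path:
--       if c == '/':
--          if parsing_name:
--             node += c
--          else:
--             nodes.append(node)
--             node=""
--       elif c == "[":
--          parsing_name=True
--          node += c
--       elif c == "]":
--          parsing_name=False
--          node += c
--       else:
--          node += c
--    # XXX
--    if '[' in node and "if" not in node:
--       nodes.append(node.split('[')[0])
--    nodes.append(node)
--    return nodes
-- ===== SOURCE B (Python) =====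
-- def _bracket_state(inside, piece):
--     for c in piece:
--         if c == '[':
--             inside = True
--         elif c == ']':
--             inside = False
--     return inside
--
--
-- def path_to_nodes(path):
--     # Two staged passes: split on '/', then merge pieces whose boundary
--     # falls inside a (non-nesting) [...] filter back together.
--     pieces = path.split('/')
--     segments = []
--     acc = pieces[0]
--     inside = _bracket_state(False, pieces[0])
--     for piece in pieces[1:]:
--         if inside:
--             acc = acc + '/' + piece
--         else:
--             segments.append(acc)
--             acc = piece
--         inside = _bracket_state(inside, piece)
--     if '[' in acc and 'if' not in acc:
--         segments.append(acc.split('[')[0])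
--     segments.append(acc)
--     return segments
-- ===== Notes on version B (the rewrite author's own statement) =====
-- stated objective: alternative
-- what changed: Replaces A's single character-by-character state machine (building each node char by char and deciding at every separator whether it splits) by two staged passes: split the path on the separator once with str.split, then a loop over the pieces that re-merges pieces whose boundary fell inside a [...] filter, tracking the bracket state per piece; bulk str.split gives a constant-factor speedup.
import Mathlib
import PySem

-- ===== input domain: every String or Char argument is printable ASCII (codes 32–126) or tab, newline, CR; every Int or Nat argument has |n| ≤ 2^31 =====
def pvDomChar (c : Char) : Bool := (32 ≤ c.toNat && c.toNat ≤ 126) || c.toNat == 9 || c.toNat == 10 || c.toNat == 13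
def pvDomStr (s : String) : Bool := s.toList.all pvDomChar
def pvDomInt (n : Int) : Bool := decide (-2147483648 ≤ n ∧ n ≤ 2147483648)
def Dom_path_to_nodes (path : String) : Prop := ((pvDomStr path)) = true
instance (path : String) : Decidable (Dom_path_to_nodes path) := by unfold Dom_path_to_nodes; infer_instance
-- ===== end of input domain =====

-- B replaces A's single char-by-char state machine by two staged passes (split on '/' then
-- re-merge pieces whose boundary lies inside brackets); objective: alternative decomposition.

-- ===== PORT A =====
-- A's char loop: state = (nodes so far, current node chars, parsing_name flag)
def pvAStep (s : List String × List Char × Bool) (c : Char) : List String × List Char × Bool :=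
  if c = '/' then
    if s.2.2 then (s.1, s.2.1 ++ [c], s.2.2)
    else (s.1 ++ [String.ofList s.2.1], [], s.2.2)
  else if c = '[' then (s.1, s.2.1 ++ [c], true)
  else if c = ']' then (s.1, s.2.1 ++ [c], false)
  else (s.1, s.2.1 ++ [c], s.2.2)

def path_to_nodes (path : String) : List String :=
  let st := path.toList.foldl pvAStep ([], [], false)
  let nodes := st.1
  let node := st.2.1
  let nodes2 :=
    if PySem.Chars.isIn ['['] node && !PySem.Chars.isIn ['i', 'f'] node then
      nodes ++ [String.ofList (PySem.List.pyGetD (PySem.Chars.splitOn node ['[']) 0 [])]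
    else nodes
  nodes2 ++ [String.ofList node]

-- ===== PORT B =====
-- Source B's _bracket_state: scan a piece's chars, flipping the inside-bracket flag
def pvBracketState (inside : Bool) (piece : List Char) : Bool :=
  piece.foldl (fun st c => if c = '[' then true else if c = ']' then false else st) inside

-- Source B's piece loop: state = (segments, accumulated segment chars, inside flag)
def pvBStep (s : List String × List Char × Bool) (piece : List Char) : List String × List Char × Bool :=
  let s' :=
    if s.2.2 then (s.1, s.2.1 ++ '/' :: piece, s.2.2)
    else (s.1 ++ [String.ofList s.2.1], piece, s.2.2)
  (s'.1, s'.2.1, pvBracketState s'.2.2 piece)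

def path_to_nodes_alt (path : String) : List String :=
  let pieces := PySem.Chars.splitOn path.toList ['/']
  let p0 := PySem.List.pyGetD pieces 0 []
  let st := (PySem.List.slice pieces (some 1) none).foldl pvBStep
      ([], p0, pvBracketState false p0)
  let segments := st.1
  let acc := st.2.1
  let segments2 :=
    if PySem.Chars.isIn ['['] acc && !PySem.Chars.isIn ['i', 'f'] acc then
      segments ++ [String.ofList (PySem.List.pyGetD (PySem.Chars.splitOn acc ['[']) 0 [])]
    else segments
  segments2 ++ [String.ofList acc]

-- ===== PRECONDITION & SPEC =====
def Spec_path_to_nodes (path : String) (out : List String) : Prop := out = path_to_nodes_alt path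
instance (path : String) (out : List String) : Decidable (Spec_path_to_nodes path out) := by
  unfold Spec_path_to_nodes; infer_instance

-- ===== CLAIM (what is proved, stated in full; the proofs are below) =====
def Claim_equal_path_to_nodes : Prop :=
  ∀ (path : String), Dom_path_to_nodes path → Spec_path_to_nodes path (path_to_nodes path)

-- ===== LEMMAS AND PROOFS =====

-- reference split: pvSplit pre s = the pieces of pre ++ s cut at '/' (pre = partial first piece)
def pvSplit (pre : List Char) : List Char → List (List Char)
  | [] => [pre]
  | c :: rest => if c = '/' then pre :: pvSplit [] rest else pvSplit (pre ++ [c]) rest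

theorem splitOn_go_eq (fuel : Nat) : ∀ (s cur : List Char) (acc : List (List Char)),
    s.length < fuel →
    PySem.Chars.splitOn.go ['/'] fuel s cur acc = acc.reverse ++ pvSplit cur.reverse s := by
  induction fuel with
  | zero => intro s cur acc h; omega
  | succ f ih =>
    intro s cur acc h
    cases s with
    | nil => simp [PySem.Chars.splitOn.go, pvSplit]
    | cons c rest =>
      by_cases hc : c = '/'
      · subst hc
        simp only [PySem.Chars.splitOn.go, List.isPrefixOf]
        rw [if_pos (by simp)]
        rw [show List.drop ['/'].length ('/' :: rest) = rest from rfl]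
        rw [ih rest [] (cur.reverse :: acc) (by simp at h ⊢; omega)]
        simp [pvSplit]
      · simp only [PySem.Chars.splitOn.go]
        rw [if_neg (by simp [List.isPrefixOf]; exact fun hh => hc hh.symm)]
        rw [ih rest (c :: cur) acc (by simp at h ⊢; omega)]
        simp [pvSplit, hc]

theorem splitOn_eq (s : List Char) : PySem.Chars.splitOn s ['/'] = pvSplit [] s := by
  simpa using splitOn_go_eq (s.length + 1) s [] [] (by omega)

theorem pvSplit_ne_nil (s : List Char) : ∀ pre, pvSplit pre s ≠ [] := by
  induction s with
  | nil => intro pre; simp [pvSplit]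
  | cons c rest ih =>
    intro pre
    by_cases hc : c = '/' <;> simp [pvSplit, hc, ih]

-- run B's loop with the head piece merged (without '/') onto the current node
def pvBRun (st : List String × List Char × Bool) : List (List Char) → List String × List Char × Bool
  | [] => st
  | p :: ps => ps.foldl pvBStep (st.1, st.2.1 ++ p, pvBracketState st.2.2 p)

-- the heart: A's char loop equals B's piece loop on the split of the input
theorem main_eq (s : List Char) : ∀ (pre : List Char) (ns : List String) (nd : List Char) (b : Bool),
    s.foldl pvAStep (ns, nd ++ pre, pvBracketState b pre) = pvBRun (ns, nd, b) (pvSplit pre s) := by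
  induction s with
  | nil => intro pre ns nd b; simp [pvSplit, pvBRun]
  | cons c rest ih =>
    intro pre ns nd b
    by_cases hc : c = '/'
    · subst hc
      obtain ⟨p0, ps0, hps⟩ : ∃ p0 ps0, pvSplit [] rest = p0 :: ps0 := by
        cases hsp : pvSplit [] rest with
        | nil => exact absurd hsp (pvSplit_ne_nil rest [])
        | cons p0 ps0 => exact ⟨p0, ps0, rfl⟩
      rw [show pvSplit pre ('/' :: rest) = pre :: p0 :: ps0 by simp [pvSplit, hps]]
      by_cases hb : pvBracketState b pre = true
      · have h2 := ih [] ns ((nd ++ pre) ++ ['/']) true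
        simp only [List.append_nil] at h2
        rw [show pvBracketState true ([] : List Char) = true from rfl] at h2
        calc List.foldl pvAStep (ns, nd ++ pre, pvBracketState b pre) ('/' :: rest)
            = List.foldl pvAStep (ns, (nd ++ pre) ++ ['/'], true) rest := by
              rw [List.foldl_cons, hb]
              rw [show pvAStep (ns, nd ++ pre, true) '/' = (ns, (nd ++ pre) ++ ['/'], true) by
                simp [pvAStep]]
          _ = pvBRun (ns, (nd ++ pre) ++ ['/'], true) (p0 :: ps0) := by rw [h2, hps]
          _ = pvBRun (ns, nd, b) (pre :: p0 :: ps0) := by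
              simp [pvBRun, pvBStep, hb]
      · have hb' : pvBracketState b pre = false := by simpa using hb
        have h2 := ih [] (ns ++ [String.ofList (nd ++ pre)]) [] false
        simp only [List.append_nil] at h2
        rw [show pvBracketState false ([] : List Char) = false from rfl] at h2
        calc List.foldl pvAStep (ns, nd ++ pre, pvBracketState b pre) ('/' :: rest)
            = List.foldl pvAStep (ns ++ [String.ofList (nd ++ pre)], [], false) rest := by
              rw [List.foldl_cons, hb']
              rw [show pvAStep (ns, nd ++ pre, false) '/' =
                (ns ++ [String.ofList (nd ++ pre)], [], false) by simp [pvAStep]]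
          _ = pvBRun (ns ++ [String.ofList (nd ++ pre)], [], false) (p0 :: ps0) := by
              rw [h2, hps]
          _ = pvBRun (ns, nd, b) (pre :: p0 :: ps0) := by
              simp [pvBRun, pvBStep, hb']
    · have h1 : pvAStep (ns, nd ++ pre, pvBracketState b pre) c =
          (ns, nd ++ (pre ++ [c]), pvBracketState b (pre ++ [c])) := by
        by_cases h1 : c = '['
        · subst h1; simp [pvAStep, pvBracketState]
        · by_cases h2 : c = ']'
          · subst h2; simp [pvAStep, pvBracketState]
          · simp [pvAStep, hc, h1, h2, pvBracketState]
      rw [show pvSplit pre (c :: rest) = pvSplit (pre ++ [c]) rest by simp [pvSplit, hc]]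
      rw [List.foldl_cons, h1, ih (pre ++ [c]) ns nd b]

-- ===== VERDICT (by name: the statement is the Claim_ definition above) =====
theorem path_to_nodes_spec : Claim_equal_path_to_nodes := by
  intro path _
  unfold Spec_path_to_nodes path_to_nodes path_to_nodes_alt
  obtain ⟨p0, ps0, hps⟩ : ∃ p0 ps0, pvSplit [] path.toList = p0 :: ps0 := by
    cases hsp : pvSplit [] path.toList with
    | nil => exact absurd hsp (pvSplit_ne_nil path.toList [])
    | cons p0 ps0 => exact ⟨p0, ps0, rfl⟩
  have hA : path.toList.foldl pvAStep ([], [], false) =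
      ps0.foldl pvBStep ([], p0, pvBracketState false p0) := by
    have h := main_eq path.toList [] [] [] false
    rw [show pvBracketState false ([] : List Char) = false from rfl] at h
    simp only [List.append_nil] at h
    rw [h, hps]
    simp [pvBRun]
  rw [splitOn_eq, hps]
  simp only [PySem.List.pyGetD_zero_cons, PySem.List.slice_from_one, List.tail_cons]
  rw [hA]
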